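-- pv_equiv track=rewrite | github.com/kuntito/LeetcodeGrind | 0/amazon mide ibraheem/tg.py | solution
-- ===== SOURCE A (Python) =====
-- from collections import Counter
--
-- def solution(chars, m):
--     pass
--     # split `chars` into prefix and suffix
--     # check all combinations i.e. (chars[0], chars[1:]), (chars[:1], chars[2:])
--     # count how many times, both splits have more than `m` characters in common
--
--     rightCounter = Counter(chars)
--     leftCounter = Counter()
--
--     count = 0
--     matches = set()
--     for ch in chars:
--         remove_and_clean_up(ch, rightCounter)
--
--         if ch in leftCounter:
--             leftCounter[ch] += 1
--             if ch not in rightCounter: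
--                 matches.remove(ch)
--         else:
--             leftCounter[ch] = 1
--             if ch in rightCounter:
--                 matches.add(ch)
--
--         if len(matches) > m:
--             count += 1
--
--     return count
--
-- def remove_and_clean_up(ch, counter):
--     counter[ch] -= 1
--     if counter[ch] == 0:
--         del counter[ch]
-- ===== SOURCE B (Python) =====
-- def solution(chars, m):
--     # per-split recomputation: a split after position i shares the distinct
--     # chars common to both sides; count splits sharing more than m of them
--     count = 0
--     for i in range(1, len(chars) + 1):
--         if len(set(chars[:i]) & set(chars[i:])) > m:
--             count += 1
--     return count
-- ===== Notes on version B (the rewrite author's own statement) =====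
-- stated objective: simpler
-- what changed: A incrementally maintains two Counters and a mutable shared-character set over one scan; B directly recomputes len(set(prefix) & set(suffix)) for each split position, trading the incremental state for a short per-split set intersection.
import Mathlib
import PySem

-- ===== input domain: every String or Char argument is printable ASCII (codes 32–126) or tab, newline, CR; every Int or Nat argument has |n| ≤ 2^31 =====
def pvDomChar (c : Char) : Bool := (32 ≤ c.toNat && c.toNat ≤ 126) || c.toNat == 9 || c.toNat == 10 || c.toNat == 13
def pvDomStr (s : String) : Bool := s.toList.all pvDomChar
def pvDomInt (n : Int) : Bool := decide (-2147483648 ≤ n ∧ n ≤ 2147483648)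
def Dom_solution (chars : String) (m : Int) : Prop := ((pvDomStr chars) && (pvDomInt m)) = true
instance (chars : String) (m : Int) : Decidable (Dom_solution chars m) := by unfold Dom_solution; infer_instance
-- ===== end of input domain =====

-- B replaces A's incrementally maintained pair of Counters and shared-char set by a direct
-- per-split recomputation len(set(prefix) & set(suffix)) — simpler, same return value.

-- ===== PORT A =====
-- helper remove_and_clean_up(ch, counter)
-- counter[ch] -= 1 (Counter default 0); if counter[ch] == 0: del counter[ch]
def removeAndCleanUp (ch : Char) (counter : PySem.Dict Char Int) : PySem.Dict Char Int :=
  if (counter.modify ch 0 (fun v => v - 1)).getD ch 0 == 0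
  then (counter.modify ch 0 (fun v => v - 1)).erase ch
  else counter.modify ch 0 (fun v => v - 1)

-- one iteration of A's loop body; state = (rightCounter, leftCounter, count, matchesSet)
def stepA (m : Int) (st : PySem.Dict Char Int × PySem.Dict Char Int × Int × PySem.Set Char)
    (ch : Char) : PySem.Dict Char Int × PySem.Dict Char Int × Int × PySem.Set Char :=
  let right := removeAndCleanUp ch st.1
  let left := st.2.1
  let count := st.2.2.1
  let matchesSet := st.2.2.2
  let lm :=
    if left.contains ch then
      (left.modify ch 0 (fun v => v + 1),
       -- Python's matchesSet.remove(ch) never raises here: on this branch ch was in both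
       -- counters before the step, hence ch ∈ matchesSet, and remove = discard
       if !right.contains ch then PySem.Set.discard matchesSet ch else matchesSet)
    else
      (left.insert ch 1,
       if right.contains ch then PySem.Set.add matchesSet ch else matchesSet)
  let count := if PySem.Set.len lm.2 > m then count + 1 else count
  (right, lm.1, count, lm.2)

def solution (chars : String) (m : Int) : Int :=
  let cs := chars.toList
  (cs.foldl (stepA m)
    (PySem.Dict.counter cs, PySem.Dict.empty, 0, PySem.Set.empty)).2.2.1

-- ===== PORT B =====
def solution_alt (chars : String) (m : Int) : Int :=
  let cs := chars.toList
  (PySem.List.pyRange 1 ((cs.length : Int) + 1)).foldl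
    (fun count i =>
      if PySem.Set.len (PySem.Set.inter
            (PySem.Set.ofList (PySem.List.slice cs none (some i)))
            (PySem.Set.ofList (PySem.List.slice cs (some i) none))) > m
      then count + 1 else count) 0

-- ===== PRECONDITION & SPEC =====
def Spec_solution (chars : String) (m : Int) (out : Int) : Prop := out = solution_alt chars m
instance (chars : String) (m : Int) (out : Int) : Decidable (Spec_solution chars m out) := by unfold Spec_solution; infer_instance

-- ===== CLAIM (what is proved, stated in full; the proofs are below) =====
def Claim_equal_solution : Prop := ∀ (chars : String) (m : Int), Dom_solution chars m → Spec_solution chars m (solution chars m)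

-- ===== LEMMAS AND PROOFS =====

-- number of distinct characters common to cs[:k] and cs[k:]
def sharedNat (cs : List Char) (k : Nat) : Nat :=
  (PySem.Set.inter (PySem.Set.ofList (cs.take k)) (PySem.Set.ofList (cs.drop k))).length

-- count of split positions k+1, …, k+n (1-based prefix lengths) with > m shared chars
def tailCount (cs : List Char) (m : Int) (k : Nat) : Nat → Int
  | 0 => 0
  | n + 1 => (if (sharedNat cs (k + 1) : Int) > m then 1 else 0) + tailCount cs m (k + 1) n

lemma length_eq_of_nodup_of_mem_iff {l₁ l₂ : List Char}
    (h₁ : l₁.Nodup) (h₂ : l₂.Nodup) (h : ∀ a, a ∈ l₁ ↔ a ∈ l₂) :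
    l₁.length = l₂.length :=
  ((List.perm_ext_iff_of_nodup h₁ h₂).2 h).length_eq

-- Dict.erase facts (no named PySem lemmas exist for erase; proved from the definitions)
lemma find?_filter_out_self (items : List (Char × Int)) (k : Char) :
    (items.filter (fun p => !(p.1 == k))).find? (fun p => p.1 == k) = none := by
  induction items with
  | nil => rfl
  | cons hd tl ih =>
    by_cases h : hd.1 = k <;> simp [List.filter_cons, h, List.find?_cons, ih]

lemma find?_filter_out_of_ne (items : List (Char × Int)) (k c : Char) (h : c ≠ k) :
    (items.filter (fun p => !(p.1 == k))).find? (fun p => p.1 == c)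
      = items.find? (fun p => p.1 == c) := by
  induction items with
  | nil => rfl
  | cons hd tl ih =>
    by_cases h1 : hd.1 = k
    · have h2 : hd.1 ≠ c := by rw [h1]; exact fun hkc => h hkc.symm
      simp [List.filter_cons, h1, beq_eq_false_iff_ne.mpr (Ne.symm h), ih]
    · by_cases h2 : hd.1 = c <;> simp [List.filter_cons, h1, h2, h, List.find?_cons, ih]

lemma dict_get?_erase (d : PySem.Dict Char Int) (k c : Char) :
    (d.erase k).get? c = if c = k then none else d.get? c := by
  obtain ⟨items⟩ := d
  by_cases h : c = k
  · subst h
    simp [PySem.Dict.erase, PySem.Dict.get?, find?_filter_out_self]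
  · simp [PySem.Dict.erase, PySem.Dict.get?, find?_filter_out_of_ne items k c h, h]

lemma dict_getD_erase (d : PySem.Dict Char Int) (k c : Char) :
    (d.erase k).getD c 0 = if c = k then 0 else d.getD c 0 := by
  rw [PySem.Dict.getD_eq_get?_getD, PySem.Dict.getD_eq_get?_getD, dict_get?_erase]
  by_cases h : c = k <;> simp [h]

lemma dict_contains_erase (d : PySem.Dict Char Int) (k c : Char) :
    (d.erase k).contains c = if c = k then false else d.contains c := by
  rw [PySem.Dict.contains_eq_isSome_get?, dict_get?_erase]
  by_cases h : c = k <;> simp [h, PySem.Dict.contains_eq_isSome_get?]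

lemma modify_sub_one_getD (ch : Char) (right : PySem.Dict Char Int) (s' : List Char)
    (hg : ∀ c, right.getD c 0 = ((ch :: s').count c : Int)) :
    ∀ c, (right.modify ch 0 (fun v => v - 1)).getD c 0 = (s'.count c : Int) := by
  intro c
  rw [PySem.Dict.getD_modify]
  by_cases h : c = ch
  · subst h
    rw [if_pos rfl, hg c, List.count_cons_self]
    push_cast; ring
  · rw [if_neg h, hg c]
    simp [List.count_cons, h, Ne.symm h]

lemma removeAndCleanUp_getD (ch : Char) (right : PySem.Dict Char Int) (s' : List Char)
    (hg : ∀ c, right.getD c 0 = ((ch :: s').count c : Int)) :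
    ∀ c, (removeAndCleanUp ch right).getD c 0 = (s'.count c : Int) := by
  intro c
  have hall := modify_sub_one_getD ch right s' hg
  unfold removeAndCleanUp
  split_ifs with h0
  · rw [hall ch] at h0
    have hz' : ((s'.count ch : Int)) = 0 := by simpa using h0
    have hz : s'.count ch = 0 := by exact_mod_cast hz'
    rw [dict_getD_erase]
    by_cases h : c = ch
    · subst h; rw [if_pos rfl, hz]; rfl
    · rw [if_neg h, hall c]
  · exact hall c

lemma removeAndCleanUp_contains (ch : Char) (right : PySem.Dict Char Int) (s' : List Char)
    (hg : ∀ c, right.getD c 0 = ((ch :: s').count c : Int))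
    (hc : ∀ c, right.contains c = true ↔ c ∈ ch :: s') :
    ∀ c, (removeAndCleanUp ch right).contains c = true ↔ c ∈ s' := by
  intro c
  have hall := modify_sub_one_getD ch right s' hg
  have hcm : ∀ c', (right.modify ch 0 (fun v => v - 1)).contains c' = true ↔ c' ∈ ch :: s' := by
    intro c'
    rw [PySem.Dict.contains_modify]
    by_cases h : c' = ch
    · simp [h]
    · simp [h, hc c']
  unfold removeAndCleanUp
  split_ifs with h0
  · rw [hall ch] at h0
    have hz' : ((s'.count ch : Int)) = 0 := by simpa using h0
    have hz : s'.count ch = 0 := by exact_mod_cast hz'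
    have hns : ch ∉ s' := by
      intro hmem
      exact absurd hz (Nat.pos_iff_ne_zero.mp (List.count_pos_iff.mpr hmem))
    rw [dict_contains_erase]
    by_cases h : c = ch
    · subst h; simp [hns]
    · rw [if_neg h]
      rw [hcm c]
      simp [List.mem_cons, h]
  · rw [hall ch] at h0
    have hnz : s'.count ch ≠ 0 := by
      intro hz
      exact h0 (by simp [hz])
    have hs : ch ∈ s' := List.count_pos_iff.mp (Nat.pos_iff_ne_zero.mpr hnz)
    rw [hcm c]
    by_cases h : c = ch
    · subst h; simp [hs]
    · simp [List.mem_cons, h]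

lemma loopA (m : Int) (cs : List Char) :
    ∀ (s p : List Char) (right left : PySem.Dict Char Int) (count : Int)
      (matchesSet : PySem.Set Char),
      cs = p ++ s →
      (∀ c, right.getD c 0 = (s.count c : Int)) →
      (∀ c, right.contains c = true ↔ c ∈ s) →
      (∀ c, left.contains c = true ↔ c ∈ p) →
      matchesSet.Nodup →
      (∀ c, c ∈ matchesSet ↔ c ∈ p ∧ c ∈ s) →
      (s.foldl (stepA m) (right, left, count, matchesSet)).2.2.1
        = count + tailCount cs m p.length s.length := by
  intro s
  induction s with
  | nil =>
    intro p right left count matchesSet _ _ _ _ _ _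
    simp [tailCount]
  | cons ch s' ih =>
    intro p right left count matchesSet hcs hg hc hl hnd hm
    rw [List.foldl_cons]
    have hR := removeAndCleanUp_getD ch right s' hg
    have hRc := removeAndCleanUp_contains ch right s' hg hc
    have hcs' : cs = (p ++ [ch]) ++ s' := by rw [hcs]; simp
    by_cases hp : ch ∈ p
    · have hlc : left.contains ch = true := (hl ch).2 hp
      have hstep : stepA m (right, left, count, matchesSet) ch
          = (removeAndCleanUp ch right,
             left.modify ch 0 (fun v => v + 1),
             (if PySem.Set.len (if !(removeAndCleanUp ch right).contains ch
                  then PySem.Set.discard matchesSet ch else matchesSet) > m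
              then count + 1 else count),
             (if !(removeAndCleanUp ch right).contains ch
              then PySem.Set.discard matchesSet ch else matchesSet)) := by
        simp [stepA, hlc]
      have hl' : ∀ c, (left.modify ch 0 (fun v => v + 1)).contains c = true ↔ c ∈ p ++ [ch] := by
        intro c
        rw [PySem.Dict.contains_modify]
        by_cases h : c = ch <;> simp [h, hl c]
      have hnd' : (if !(removeAndCleanUp ch right).contains ch
          then PySem.Set.discard matchesSet ch else matchesSet).Nodup := by
        split_ifs
        · exact PySem.Set.nodup_discard _ _ hnd
        · exact hnd
      have hm' : ∀ c, c ∈ (if !(removeAndCleanUp ch right).contains ch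
          then PySem.Set.discard matchesSet ch else matchesSet) ↔ c ∈ p ++ [ch] ∧ c ∈ s' := by
        intro c
        by_cases hs : ch ∈ s'
        · have hRt : (removeAndCleanUp ch right).contains ch = true := (hRc ch).2 hs
          have hMeq : (if !(removeAndCleanUp ch right).contains ch
              then PySem.Set.discard matchesSet ch else matchesSet) = matchesSet := by
            simp [hRt]
          rw [hMeq, hm c]
          simp only [List.mem_append, List.mem_cons, List.not_mem_nil, or_false]
          by_cases h : c = ch
          · subst h; tauto
          · tauto
        · have hRf : (removeAndCleanUp ch right).contains ch = false :=
            Bool.eq_false_iff.mpr (fun h => hs ((hRc ch).1 h))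
          have hMeq : (if !(removeAndCleanUp ch right).contains ch
              then PySem.Set.discard matchesSet ch else matchesSet)
                = PySem.Set.discard matchesSet ch := by simp [hRf]
          rw [hMeq, PySem.Set.mem_discard, hm c]
          simp only [List.mem_append, List.mem_cons, List.not_mem_nil, or_false]
          by_cases h : c = ch
          · subst h; tauto
          · tauto
      have hlenM : PySem.Set.len (if !(removeAndCleanUp ch right).contains ch
          then PySem.Set.discard matchesSet ch else matchesSet) = (sharedNat cs (p.length + 1) : Int) := by
        have hmm : (if !(removeAndCleanUp ch right).contains ch
            then PySem.Set.discard matchesSet ch else matchesSet).length = sharedNat cs (p.length + 1) := by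
          unfold sharedNat
          rw [hcs']
          have hlen1 : p.length + 1 = (p ++ [ch]).length := by simp
          rw [hlen1, List.take_left, List.drop_left]
          exact length_eq_of_nodup_of_mem_iff hnd'
            (PySem.Set.nodup_inter _ _ (PySem.Set.nodup_ofList _))
            (fun a => by
              rw [hm' a, PySem.Set.mem_inter, PySem.Set.mem_ofList, PySem.Set.mem_ofList])
        unfold PySem.Set.len
        exact_mod_cast hmm
      have hrec := ih (p ++ [ch]) (removeAndCleanUp ch right)
        (left.modify ch 0 (fun v => v + 1))
        (if PySem.Set.len (if !(removeAndCleanUp ch right).contains ch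
            then PySem.Set.discard matchesSet ch else matchesSet) > m
         then count + 1 else count)
        (if !(removeAndCleanUp ch right).contains ch
         then PySem.Set.discard matchesSet ch else matchesSet)
        hcs' hR hRc hl' hnd' hm'
      have hplen : (p ++ [ch]).length = p.length + 1 := by simp
      rw [hplen] at hrec
      rw [hstep, hrec, hlenM]
      have ht : tailCount cs m p.length (ch :: s').length
          = (if (sharedNat cs (p.length + 1) : Int) > m then 1 else 0)
            + tailCount cs m (p.length + 1) s'.length := rfl
      rw [ht]
      split_ifs <;> ring
    · have hlc : left.contains ch = false :=
        Bool.eq_false_iff.mpr (fun h => hp ((hl ch).1 h))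
      have hstep : stepA m (right, left, count, matchesSet) ch
          = (removeAndCleanUp ch right,
             left.insert ch 1,
             (if PySem.Set.len (if (removeAndCleanUp ch right).contains ch
                  then PySem.Set.add matchesSet ch else matchesSet) > m
              then count + 1 else count),
             (if (removeAndCleanUp ch right).contains ch
              then PySem.Set.add matchesSet ch else matchesSet)) := by
        simp [stepA, hlc]
      have hl' : ∀ c, (left.insert ch 1).contains c = true ↔ c ∈ p ++ [ch] := by
        intro c
        rw [PySem.Dict.contains_insert]
        by_cases h : c = ch <;> simp [h, hl c]
      have hnd' : (if (removeAndCleanUp ch right).contains ch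
          then PySem.Set.add matchesSet ch else matchesSet).Nodup := by
        split_ifs
        · exact PySem.Set.nodup_add _ _ hnd
        · exact hnd
      have hm' : ∀ c, c ∈ (if (removeAndCleanUp ch right).contains ch
          then PySem.Set.add matchesSet ch else matchesSet) ↔ c ∈ p ++ [ch] ∧ c ∈ s' := by
        intro c
        by_cases hs : ch ∈ s'
        · have hRt : (removeAndCleanUp ch right).contains ch = true := (hRc ch).2 hs
          have hMeq : (if (removeAndCleanUp ch right).contains ch
              then PySem.Set.add matchesSet ch else matchesSet)
                = PySem.Set.add matchesSet ch := by simp [hRt]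
          rw [hMeq, PySem.Set.mem_add, hm c]
          simp only [List.mem_append, List.mem_cons, List.not_mem_nil, or_false]
          by_cases h : c = ch
          · subst h; tauto
          · tauto
        · have hRf : (removeAndCleanUp ch right).contains ch = false :=
            Bool.eq_false_iff.mpr (fun h => hs ((hRc ch).1 h))
          have hMeq : (if (removeAndCleanUp ch right).contains ch
              then PySem.Set.add matchesSet ch else matchesSet) = matchesSet := by
            simp [hRf]
          rw [hMeq, hm c]
          simp only [List.mem_append, List.mem_cons, List.not_mem_nil, or_false]
          by_cases h : c = ch
          · subst h; tauto
          · tauto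
      have hlenM : PySem.Set.len (if (removeAndCleanUp ch right).contains ch
          then PySem.Set.add matchesSet ch else matchesSet) = (sharedNat cs (p.length + 1) : Int) := by
        have hmm : (if (removeAndCleanUp ch right).contains ch
            then PySem.Set.add matchesSet ch else matchesSet).length = sharedNat cs (p.length + 1) := by
          unfold sharedNat
          rw [hcs']
          have hlen1 : p.length + 1 = (p ++ [ch]).length := by simp
          rw [hlen1, List.take_left, List.drop_left]
          exact length_eq_of_nodup_of_mem_iff hnd'
            (PySem.Set.nodup_inter _ _ (PySem.Set.nodup_ofList _))
            (fun a => by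
              rw [hm' a, PySem.Set.mem_inter, PySem.Set.mem_ofList, PySem.Set.mem_ofList])
        unfold PySem.Set.len
        exact_mod_cast hmm
      have hrec := ih (p ++ [ch]) (removeAndCleanUp ch right)
        (left.insert ch 1)
        (if PySem.Set.len (if (removeAndCleanUp ch right).contains ch
            then PySem.Set.add matchesSet ch else matchesSet) > m
         then count + 1 else count)
        (if (removeAndCleanUp ch right).contains ch
         then PySem.Set.add matchesSet ch else matchesSet)
        hcs' hR hRc hl' hnd' hm'
      have hplen : (p ++ [ch]).length = p.length + 1 := by simp
      rw [hplen] at hrec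
      rw [hstep, hrec, hlenM]
      have ht : tailCount cs m p.length (ch :: s').length
          = (if (sharedNat cs (p.length + 1) : Int) > m then 1 else 0)
            + tailCount cs m (p.length + 1) s'.length := rfl
      rw [ht]
      split_ifs <;> ring

lemma foldB (cs : List Char) (m : Int) :
    ∀ (n k : Nat) (acc : Int),
      (PySem.List.pyRange ((k : Int) + 1) ((k : Int) + (n : Int) + 1)).foldl
        (fun count i =>
          if PySem.Set.len (PySem.Set.inter
                (PySem.Set.ofList (PySem.List.slice cs none (some i)))
                (PySem.Set.ofList (PySem.List.slice cs (some i) none))) > m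
          then count + 1 else count) acc
        = acc + tailCount cs m k n := by
  intro n
  induction n with
  | zero =>
    intro k acc
    rw [PySem.List.pyRange_one_eq_nil (by push_cast; omega)]
    simp [tailCount]
  | succ n ihn =>
    intro k acc
    rw [PySem.List.pyRange_one_cons (by push_cast; omega), List.foldl_cons]
    have h1 : (k : Int) + 1 = ((k + 1 : Nat) : Int) := by push_cast; ring
    have hsl : PySem.List.slice cs none (some ((k : Int) + 1)) = cs.take (k + 1) := by
      rw [h1, PySem.List.slice_to cs (by positivity), Int.toNat_natCast]
    have hsr : PySem.List.slice cs (some ((k : Int) + 1)) none = cs.drop (k + 1) := by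
      rw [h1, PySem.List.slice_from cs (by positivity), Int.toNat_natCast]
    rw [hsl, hsr]
    have hlen : PySem.Set.len (PySem.Set.inter (PySem.Set.ofList (cs.take (k + 1)))
        (PySem.Set.ofList (cs.drop (k + 1)))) = (sharedNat cs (k + 1) : Int) := rfl
    rw [hlen]
    have h2 : (k : Int) + 1 + 1 = ((k + 1 : Nat) : Int) + 1 := by push_cast; ring
    have h3 : (k : Int) + ((n + 1 : Nat) : Int) + 1 = ((k + 1 : Nat) : Int) + (n : Int) + 1 := by
      push_cast; ring
    rw [h2, h3,
      ihn (k + 1) (if (sharedNat cs (k + 1) : Int) > m then acc + 1 else acc)]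
    have ht : tailCount cs m k (n + 1)
        = (if (sharedNat cs (k + 1) : Int) > m then 1 else 0)
          + tailCount cs m (k + 1) n := rfl
    rw [ht]
    split_ifs <;> ring

-- ===== VERDICT (by name: the statement is the Claim_ definition above) =====
theorem solution_spec : Claim_equal_solution := by
  intro chars m _
  unfold Spec_solution
  simp only [solution, solution_alt]
  have hA := loopA m chars.toList chars.toList [] (PySem.Dict.counter chars.toList)
    PySem.Dict.empty 0 PySem.Set.empty
    (by simp)
    (fun c => by simpa using PySem.Dict.getD_counter chars.toList c)
    (fun c => by simp [PySem.Dict.contains_counter])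
    (fun c => by simp [PySem.Dict.contains_empty])
    List.nodup_nil
    (fun c => by simp [PySem.Set.empty])
  have hB := foldB chars.toList m chars.toList.length 0 0
  simp only [Nat.cast_zero, zero_add] at hA hB
  rw [hA, hB]
  rfl
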